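-- pv_equiv track=rewrite | github.com/pypi-data/pypi-mirror-346 | packages/acab/acab-1.0.3.tar.gz/acab-1.0.3/acab/acab.py | find_equal_columns
-- ===== SOURCE A (Python) =====
-- def find_equal_columns(S1, S2):
--     from collections import defaultdict
--     S2_index = defaultdict(list)
--     for idx, svec in enumerate(S2):
--         S2_index[svec].append(idx)
--     equal_pairs = []
--     for i, svec in enumerate(S1):
--         for j in S2_index.get(svec, []):
--             equal_pairs.append((i, j))
--     return sorted(equal_pairs)
-- ===== SOURCE B (Python) =====
-- def find_equal_columns(S1, S2):
--     equal_pairs = []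
--     for i, c1 in enumerate(S1):
--         for j, c2 in enumerate(S2):
--             if c2 == c1:
--                 equal_pairs.append((i, j))
--     return equal_pairs
-- ===== Notes on version B (the rewrite author's own statement) =====
-- stated objective: simpler
-- what changed: Replaced the defaultdict index plus final sort with a direct doubly nested scan that emits (i, j) pairs already in lexicographic order, so no dict and no sort are needed.
import Mathlib
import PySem

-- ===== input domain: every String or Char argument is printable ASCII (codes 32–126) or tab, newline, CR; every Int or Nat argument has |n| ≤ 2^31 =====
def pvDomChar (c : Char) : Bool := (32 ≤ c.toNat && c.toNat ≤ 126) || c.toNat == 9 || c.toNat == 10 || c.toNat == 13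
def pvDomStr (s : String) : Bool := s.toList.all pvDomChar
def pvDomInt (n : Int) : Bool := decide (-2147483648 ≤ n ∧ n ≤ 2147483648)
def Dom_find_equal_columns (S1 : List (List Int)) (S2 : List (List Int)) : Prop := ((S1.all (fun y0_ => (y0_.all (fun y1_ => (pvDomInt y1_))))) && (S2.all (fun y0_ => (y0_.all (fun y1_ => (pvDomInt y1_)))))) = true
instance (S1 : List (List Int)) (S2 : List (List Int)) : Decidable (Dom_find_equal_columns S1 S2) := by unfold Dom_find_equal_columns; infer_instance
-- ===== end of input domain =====

-- B replaces A's defaultdict index + final sort by a doubly nested scan whose output is already in lexicographic order (objective: simpler).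
-- ===== PORT A =====
def find_equal_columns (S1 : List (List Int)) (S2 : List (List Int)) : List (Int × Int) :=
  let S2_index : PySem.Dict (List Int) (List Int) :=
    (PySem.List.enumerate S2).foldl (fun d p => d.modify p.2 [] (fun v => v ++ [p.1])) PySem.Dict.empty
  let equal_pairs : List (Int × Int) :=
    (PySem.List.enumerate S1).foldl
      (fun acc p => (S2_index.getD p.2 []).foldl (fun acc2 j => acc2 ++ [(p.1, j)]) acc) []
  PySem.List.sorted2 equal_pairs (fun t => t.1) (fun t => t.2) false

-- ===== PORT B =====
def find_equal_columns_alt (S1 : List (List Int)) (S2 : List (List Int)) : List (Int × Int) :=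
  (PySem.List.enumerate S1).foldl
    (fun acc p =>
      (PySem.List.enumerate S2).foldl
        (fun acc2 q => if q.2 = p.2 then acc2 ++ [(p.1, q.1)] else acc2) acc) []

-- ===== PRECONDITION & SPEC =====
def Spec_find_equal_columns (S1 : List (List Int)) (S2 : List (List Int)) (out : List (Int × Int)) : Prop := out = find_equal_columns_alt S1 S2
instance (S1 : List (List Int)) (S2 : List (List Int)) (out : List (Int × Int)) : Decidable (Spec_find_equal_columns S1 S2 out) := by unfold Spec_find_equal_columns; infer_instance

-- ===== CLAIM (what is proved, stated in full; the proofs are below) =====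
def Claim_equal_find_equal_columns : Prop := ∀ (S1 : List (List Int)) (S2 : List (List Int)), Dom_find_equal_columns S1 S2 → Spec_find_equal_columns S1 S2 (find_equal_columns S1 S2)

-- ===== LEMMAS AND PROOFS =====

-- The lexicographic "before" test sorted2 uses on (Int × Int) pairs.
def pairBefore (a b : Int × Int) : Bool :=
  decide (a.1 < b.1) || (!decide (b.1 < a.1) && decide (a.2 < b.2))

-- strict lexicographic order on pairs, as a Prop
def PairLt (a b : Int × Int) : Prop := a.1 < b.1 ∨ (a.1 = b.1 ∧ a.2 < b.2)

lemma pairBefore_false_of_lt {a b : Int × Int} (h : PairLt a b) : pairBefore b a = false := by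
  rcases h with h | ⟨h1, h2⟩ <;> simp [pairBefore] <;> omega

lemma foldl_insertBy_eq_self (l acc : List (Int × Int))
    (h : (acc ++ l).Pairwise PairLt) :
    l.foldl (fun acc x => PySem.List.insertBy pairBefore x acc) acc = acc ++ l := by
  induction l generalizing acc with
  | nil => simp
  | cons x t ih =>
    have hx : PySem.List.insertBy pairBefore x acc = acc ++ [x] := by
      apply PySem.List.insertBy_of_forall_not_before
      intro y hy
      have : PairLt y x := by
        have := (List.pairwise_append.mp h).2.2 y hy x (by simp)
        exact this
      exact pairBefore_false_of_lt this
    rw [List.foldl_cons, hx, ih (acc ++ [x]) (by simpa using h)]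
    simp

-- sorted2 with identity pair key leaves an already strictly-lex-sorted list unchanged
lemma sorted2_eq_self (l : List (Int × Int)) (h : l.Pairwise PairLt) :
    PySem.List.sorted2 l (fun t => t.1) (fun t => t.2) false = l := by
  have := foldl_insertBy_eq_self l [] (by simpa using h)
  simpa [PySem.List.sorted2, pairBefore] using this

-- per-row list produced by B's inner loop
def rowPairs (S2 : List (List Int)) (p : Int × List Int) : List (Int × Int) :=
  ((PySem.List.enumerate S2).filter (fun q => q.2 == p.2)).map (fun q => (p.1, q.1))

lemma alt_eq_flatMap (S1 S2 : List (List Int)) :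
    find_equal_columns_alt S1 S2 = (PySem.List.enumerate S1).flatMap (rowPairs S2) := by
  unfold find_equal_columns_alt
  have hstep : ∀ (acc : List (Int × Int)) (p : Int × List Int),
      (PySem.List.enumerate S2).foldl
        (fun acc2 q => if q.2 = p.2 then acc2 ++ [(p.1, q.1)] else acc2) acc
      = acc ++ rowPairs S2 p := by
    intro acc p
    rw [PySem.List.foldl_append_ite (fun q : Int × List Int => q.2 = p.2)
      (fun q => (p.1, q.1)) (PySem.List.enumerate S2) acc]
    unfold rowPairs
    congr 2
    apply List.filter_congr
    intro q _
    exact (Bool.beq_eq_decide_eq q.2 p.2).symm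
  calc (PySem.List.enumerate S1).foldl
        (fun acc p => (PySem.List.enumerate S2).foldl
          (fun acc2 q => if q.2 = p.2 then acc2 ++ [(p.1, q.1)] else acc2) acc) []
      = (PySem.List.enumerate S1).foldl (fun acc p => acc ++ rowPairs S2 p) [] := by
        apply PySem.List.foldl_congr_mem
        intro acc p _
        exact hstep acc p
    _ = [] ++ (PySem.List.enumerate S1).flatMap (rowPairs S2) :=
        PySem.List.foldl_append_eq_flatMap _ _ _
    _ = _ := by simp

lemma index_getD (S2 : List (List Int)) (c : List Int) :
    ((PySem.List.enumerate S2).foldl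
        (fun d p => d.modify p.2 [] (fun v => v ++ [p.1])) PySem.Dict.empty).getD c []
    = ((PySem.List.enumerate S2).filter (fun q => q.2 == c)).map (fun q => q.1) := by
  have hswap : (PySem.List.enumerate S2).foldl
        (fun d p => d.modify p.2 [] (fun v => v ++ [p.1])) PySem.Dict.empty
      = ((PySem.List.enumerate S2).map Prod.swap).foldl
        (fun d p => d.modify p.1 [] (fun v => v ++ [p.2])) PySem.Dict.empty := by
    rw [List.foldl_map]
    rfl
  rw [hswap, PySem.Dict.getD_foldl_modify_append]
  simp [List.filter_map, List.map_map, Function.comp_def, Prod.swap]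

lemma a_unsorted_eq (S1 S2 : List (List Int)) :
    (PySem.List.enumerate S1).foldl
      (fun acc p => ((((PySem.List.enumerate S2).foldl
          (fun d p => d.modify p.2 [] (fun v => v ++ [p.1])) PySem.Dict.empty).getD p.2 []).foldl
        (fun acc2 j => acc2 ++ [(p.1, j)]) acc)) []
    = (PySem.List.enumerate S1).flatMap (rowPairs S2) := by
  have hstep : ∀ (acc : List (Int × Int)) (p : Int × List Int),
      ((((PySem.List.enumerate S2).foldl
          (fun d p => d.modify p.2 [] (fun v => v ++ [p.1])) PySem.Dict.empty).getD p.2 []).foldl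
        (fun acc2 j => acc2 ++ [(p.1, j)]) acc) = acc ++ rowPairs S2 p := by
    intro acc p
    rw [PySem.List.foldl_append_singleton_eq_map, index_getD]
    unfold rowPairs
    simp [List.map_map, Function.comp_def]
  calc _ = (PySem.List.enumerate S1).foldl (fun acc p => acc ++ rowPairs S2 p) [] := by
        apply PySem.List.foldl_congr_mem
        intro acc p _
        exact hstep acc p
    _ = [] ++ (PySem.List.enumerate S1).flatMap (rowPairs S2) :=
        PySem.List.foldl_append_eq_flatMap _ _ _
    _ = _ := by simp

lemma pairwise_flatMap_rowPairs (S1 S2 : List (List Int)) :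
    ((PySem.List.enumerate S1).flatMap (rowPairs S2)).Pairwise PairLt := by
  rw [List.pairwise_flatMap]
  constructor
  · intro p _
    unfold rowPairs
    rw [List.pairwise_map]
    exact ((PySem.List.pairwise_lt_enumerate S2 0).imp
      (fun h => Or.inr ⟨rfl, h⟩)).sublist List.filter_sublist
  · apply (PySem.List.pairwise_lt_enumerate S1 0).imp
    intro a b hab x hx y hy
    simp only [rowPairs, List.mem_map] at hx hy
    obtain ⟨q, _, rfl⟩ := hx
    obtain ⟨r, _, rfl⟩ := hy
    exact Or.inl hab

-- ===== VERDICT (by name: the statement is the Claim_ definition above) =====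
theorem find_equal_columns_spec : Claim_equal_find_equal_columns := by
  intro S1 S2 _
  show PySem.List.sorted2
      ((PySem.List.enumerate S1).foldl
        (fun acc p => ((((PySem.List.enumerate S2).foldl
            (fun d p => d.modify p.2 [] (fun v => v ++ [p.1])) PySem.Dict.empty).getD p.2 []).foldl
          (fun acc2 j => acc2 ++ [(p.1, j)]) acc)) [])
      (fun t => t.1) (fun t => t.2) false
    = find_equal_columns_alt S1 S2
  rw [a_unsorted_eq S1 S2, sorted2_eq_self _ (pairwise_flatMap_rowPairs S1 S2),
    alt_eq_flatMap]
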